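-- pv_equiv track=rewrite | github.com/googology/worm-notations | collapsing.py | BR2
-- ===== SOURCE A (Python) =====
-- x = lambda a,b: (a[0]<b[0]) or (a[0]==b[0] and x(a[1:],b[1:])) if len(a)>0 and len(b)>0 else ((a==[] or b==[]) and len(a)<len(b))
--
-- def BR(a):
--     if len(a)<2:return None
--     for i in a[:-1]:
--         if i<a[-1]:
--             k=-1
--             while a[k]>=a[-1]:k-=1
--             return len(a)+k
--     return None
--
-- def BR2(a):
--     if BR(a)<1:return None
--     for i in range(len(a)-1,-1,-1):
--         ai = a[i:]
--         bi = a[BR(a):]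
--         if x(ai,bi):
--             return i
--     return None
-- ===== SOURCE B (Python) =====
-- def _suffix_lt(a, n, i, j):
--     while i < n and j < n:
--         if a[i] != a[j]:
--             return a[i] < a[j]
--         i += 1
--         j += 1
--     return i == n and j < n
--
-- def BR2(a):
--     n = len(a)
--     j = None
--     if n >= 2:
--         last = a[-1]
--         for k, v in enumerate(a[:-1]):
--             if v < last:
--                 j = k
--     if j is None or j < 1:
--         return None
--     best = None
--     for i in range(n):
--         if _suffix_lt(a, n, i, j):
--             best = i
--     return best
-- ===== Notes on version B (the rewrite author's own statement) =====
-- stated objective: alternative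
-- what changed: B computes the pivot index BR(a) once by a single forward last-match pass and finds the answer with one forward last-match scan using an in-place early-exit index comparison of the two suffixes, instead of A's reverse early-return scan that re-runs BR(a) and a recursive slicing comparator on every iteration.
-- outside the precondition, e.g. on BR2([-1]): A raises TypeError, B returns None; on BR2([1, 1]): A raises TypeError, B returns None
import Mathlib
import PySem

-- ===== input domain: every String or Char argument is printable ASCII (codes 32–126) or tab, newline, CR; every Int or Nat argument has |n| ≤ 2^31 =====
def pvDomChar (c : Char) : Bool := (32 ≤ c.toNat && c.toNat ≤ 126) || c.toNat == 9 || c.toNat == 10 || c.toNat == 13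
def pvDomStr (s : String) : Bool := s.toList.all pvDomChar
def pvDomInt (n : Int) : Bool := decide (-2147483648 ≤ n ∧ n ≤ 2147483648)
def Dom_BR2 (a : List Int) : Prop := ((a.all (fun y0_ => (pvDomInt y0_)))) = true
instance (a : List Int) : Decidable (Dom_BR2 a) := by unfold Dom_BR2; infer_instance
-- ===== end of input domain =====

-- B computes the pivot index once and scans forward keeping the last suffix index whose
-- suffix compares below the pivot suffix (in-place early-exit comparison), instead of A's
-- reverse early-return scan that re-runs BR and a recursive slicing comparator on every
-- iteration (objective: alternative).

-- ===== PORT A =====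

-- x = lambda a,b: …  (recursive lexicographic comparison; a[1:]/b[1:] are the tails)
def xFun : List Int → List Int → Bool
  | a0 :: as, b0 :: bs => decide (a0 < b0) || (decide (a0 = b0) && xFun as bs)
  | a, b => (a.isEmpty || b.isEmpty) && decide (a.length < b.length)

-- 'k=-1; while a[k]>=a[-1]: k-=1; return len(a)+k'; fuel = len(a) (the loop always
-- returns before that under Pre_; pyGet? none = Python's IndexError, unreachable)
def BRwhile (a : List Int) (last : Int) : Int → Nat → Option Int
  | _, 0 => none
  | k, fuel+1 =>
    match PySem.List.pyGet? a k with
    | none => none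
    | some v => if last ≤ v then BRwhile a last (k-1) fuel else some ((a.length : Int) + k)

-- 'for i in a[:-1]: if i < a[-1]: …'
def BRfor (a : List Int) (last : Int) : List Int → Option Int
  | [] => none
  | i :: rest => if i < last then BRwhile a last (-1) a.length else BRfor a last rest

def BR (a : List Int) : Option Int :=
  if a.length < 2 then none
  else
    match PySem.List.pyGet? a (-1) with
    | none => none
    | some last => BRfor a last (PySem.List.slice a none (some (-1)))

-- 'for i in range(len(a)-1,-1,-1): …' — BR(a) is re-evaluated inside the loop, as in A;
-- the 'none' arm mirrors that the loop is only reached when BR(a) is an int ≥ 1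
def BR2go (a : List Int) : List Int → Option Int
  | [] => none
  | i :: rest =>
    let ai := PySem.List.slice a (some i) none
    match BR a with
    | none => none
    | some j =>
      let bi := PySem.List.slice a (some j) none
      if xFun ai bi then some i else BR2go a rest

def BR2 (a : List Int) : Option Int :=
  match BR a with
  | none => none   -- Python: 'BR(a) < 1' raises TypeError (None < int); excluded by Pre_BR2
  | some j =>
    if j < 1 then none
    else BR2go a (PySem.List.pyRange ((a.length : Int) - 1) (-1) (-1))

-- ===== PORT B =====

-- Source B's _suffix_lt(a, n, i, j): 'a[i:] < a[j:]' compared in place with early exit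
def suffixLt (a : List Int) (n : Nat) (i : Nat) (j : Nat) : Bool :=
  if h : i < n ∧ j < n then
    if a.getD i 0 ≠ a.getD j 0 then decide (a.getD i 0 < a.getD j 0)
    else suffixLt a n (i+1) (j+1)
  else decide (i = n) && decide (j < n)
termination_by n - i
decreasing_by omega

def BR2_alt (a : List Int) : Option Int :=
  let n := a.length
  let j : Option Int :=
    if 2 ≤ n then
      let last := (a.getLast?).getD 0
      (PySem.List.enumerate a.dropLast 0).foldl
        (fun acc kv => if kv.2 < last then some kv.1 else acc) none
    else none
  match j with
  | none => none
  | some j =>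
    if j < 1 then none
    else
      (List.range n).foldl
        (fun best i => if suffixLt a n i j.toNat then some (i : Int) else best) none

-- ===== PRECONDITION & SPEC =====
-- Pre_ excludes exactly the inputs on which A raises TypeError ('BR(a) < 1' with BR(a) = None):
-- lists of length < 2 and lists whose a[:-1] has no element below a[-1].
def Pre_BR2 (a : List Int) : Prop :=
  2 ≤ a.length ∧ a.dropLast.any (fun v => decide (v < (a.getLast?).getD 0)) = true
instance (a : List Int) : Decidable (Pre_BR2 a) := by unfold Pre_BR2; infer_instance

def pvWitness_BR2 : List Int := [0, 5, 1, 3]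

def Spec_BR2 (a : List Int) (out : Option Int) : Prop := out = BR2_alt a
instance (a : List Int) (out : Option Int) : Decidable (Spec_BR2 a out) := by unfold Spec_BR2; infer_instance

-- ===== CLAIM (what is proved, stated in full; the proofs are below) =====
def Claim_equal_BR2 : Prop := ∀ (a : List Int), Dom_BR2 a → Pre_BR2 a → Spec_BR2 a (BR2 a)


-- ===== LEMMAS AND PROOFS =====

-- rightmost element of l below `last`, with its index: helper for both characterizations
def lastLt (last : Int) : List Int → Option (Nat × Int)
  | [] => none
  | v :: t =>
    match lastLt last t with
    | some (i, w) => some (i+1, w)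
    | none => if v < last then some (0, v) else none

theorem find?_congr_mem {α : Type} (l : List α) (p q : α → Bool)
    (h : ∀ x ∈ l, p x = q x) : l.find? p = l.find? q := by
  induction l with
  | nil => rfl
  | cons x t ih =>
    rw [List.find?_cons, List.find?_cons, h x (by simp)]
    cases q x
    · exact ih fun y hy => h y (by simp [hy])
    · rfl

theorem suffixLt_eq_xFun (a : List Int) :
    ∀ (k i j : Nat), a.length - i ≤ k → i ≤ a.length → j ≤ a.length →
      suffixLt a a.length i j = xFun (a.drop i) (a.drop j) := by
  intro k
  induction k with
  | zero =>
    intro i j hk hi hj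
    have hin : i = a.length := by omega
    subst hin
    rw [suffixLt, dif_neg (by omega), List.drop_length]
    cases hdj : a.drop j with
    | nil =>
      have : a.length ≤ j := List.drop_eq_nil_iff.mp hdj
      simp [xFun, show ¬ j < a.length by omega]
    | cons y ys =>
      have : ¬ a.length ≤ j := fun hc => by simp [List.drop_eq_nil_iff.mpr hc] at hdj
      have hlen : 0 < (y :: ys).length := by simp
      simp [xFun, show j < a.length by omega]
  | succ k ih =>
    intro i j hk hi hj
    by_cases hcond : i < a.length ∧ j < a.length
    · obtain ⟨hin, hjn⟩ := hcond
      rw [suffixLt, dif_pos ⟨hin, hjn⟩,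
        List.drop_eq_getElem_cons hin, List.drop_eq_getElem_cons hjn,
        List.getD_eq_getElem a 0 hin, List.getD_eq_getElem a 0 hjn]
      by_cases heq : a[i] = a[j]
      · simp only [heq, ne_eq, not_true_eq_false, if_false, xFun]
        rw [ih (i+1) (j+1) (by omega) (by omega) (by omega)]
        simp
      · simp only [ne_eq, heq, not_false_eq_true, if_true, xFun]
        simp
    · rw [suffixLt, dif_neg hcond]
      by_cases hin : i = a.length
      · subst hin
        rw [List.drop_length]
        cases hdj : a.drop j with
        | nil =>
          have : a.length ≤ j := List.drop_eq_nil_iff.mp hdj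
          simp [xFun, show ¬ j < a.length by omega]
        | cons y ys =>
          have : ¬ a.length ≤ j := fun hc => by simp [List.drop_eq_nil_iff.mpr hc] at hdj
          simp [xFun, show j < a.length by omega]
      · have hjn : j = a.length := by omega
        subst hjn
        have hin' : i < a.length := by omega
        rw [List.drop_length, List.drop_eq_getElem_cons hin']
        simp [xFun, show i ≠ a.length by omega]

theorem lastLt_none (last : Int) (l : List Int) (h : lastLt last l = none) :
    ∀ m (hm : m < l.length), ¬ l[m] < last := by
  induction l with
  | nil => intro m hm; simp at hm
  | cons v t ih =>
    intro m hm
    simp only [lastLt] at h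
    cases ht : lastLt last t with
    | some iw => obtain ⟨i, w⟩ := iw; rw [ht] at h; simp at h
    | none =>
      rw [ht] at h
      by_cases hv : v < last
      · simp [hv] at h
      · cases m with
        | zero => simpa using hv
        | succ m' => simpa using ih ht m' (by simpa using hm)

theorem lastLt_spec (last : Int) (l : List Int) (i : Nat) (w : Int)
    (h : lastLt last l = some (i, w)) :
    ∃ (hi : i < l.length), l[i] = w ∧ w < last ∧
      ∀ m (hm : m < l.length), i < m → ¬ l[m] < last := by
  induction l generalizing i w with
  | nil => simp [lastLt] at h
  | cons v t ih =>
    simp only [lastLt] at h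
    cases ht : lastLt last t with
    | some iw =>
      obtain ⟨i', w'⟩ := iw
      rw [ht] at h
      simp only [Option.some.injEq, Prod.mk.injEq] at h
      obtain ⟨hi, hw⟩ := h
      subst hi; subst hw
      obtain ⟨hi', hel, hwl, hmx⟩ := ih i' w' ht
      refine ⟨by simpa using Nat.succ_lt_succ hi', by simpa using hel, hwl, ?_⟩
      intro m hm hgt
      cases m with
      | zero => omega
      | succ m' =>
        simpa using hmx m' (by simpa using hm) (by omega)
    | none =>
      rw [ht] at h
      by_cases hv : v < last
      · rw [if_pos hv] at h
        simp only [Option.some.injEq, Prod.mk.injEq] at h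
        obtain ⟨hi, hw⟩ := h
        subst hi; subst hw
        refine ⟨by simp, by simp, hv, ?_⟩
        intro m hm hgt
        cases m with
        | zero => omega
        | succ m' => simpa using lastLt_none last t ht m' (by simpa using hm)
      · rw [if_neg hv] at h; simp at h

theorem lastLt_isSome_of_any (last : Int) (l : List Int)
    (h : l.any (fun v => decide (v < last)) = true) : (lastLt last l).isSome := by
  induction l with
  | nil => simp at h
  | cons v t ih =>
    simp only [lastLt]
    cases ht : lastLt last t with
    | some iw => simp
    | none =>
      simp only [List.any_cons, Bool.or_eq_true, decide_eq_true_eq] at h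
      rcases h with hv | hany
      · simp [hv]
      · have := ih hany
        rw [ht] at this
        simp at this

-- a last-match left fold is the first match of the reversed list
theorem foldl_lastmatch {α β : Type} (p : α → Bool) (f : α → β) (l : List α) (acc : Option β) :
    l.foldl (fun acc x => if p x then some (f x) else acc) acc
      = match l.reverse.find? p with | some x => some (f x) | none => acc := by
  induction l generalizing acc with
  | nil => simp
  | cons x t ih =>
    simp only [List.foldl_cons, List.reverse_cons, List.find?_append]
    rw [ih]
    cases t.reverse.find? p with
    | some y => simp
    | none => by_cases hx : p x <;> simp [List.find?, hx]

theorem enum_rev_find (last : Int) (l : List Int) (s : Int) :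
    (PySem.List.enumerate l s).reverse.find? (fun kv => decide (kv.2 < last))
      = (lastLt last l).map (fun iw => (s + (iw.1 : Int), iw.2)) := by
  induction l generalizing s with
  | nil => simp [PySem.List.enumerate_nil, lastLt]
  | cons v t ih =>
    rw [PySem.List.enumerate_cons]
    simp only [List.reverse_cons, List.find?_append, ih, lastLt]
    cases ht : lastLt last t with
    | some iw =>
      obtain ⟨i, w⟩ := iw
      simp only [Option.map_some, Option.some_or, Option.some.injEq, Prod.mk.injEq]
      constructor
      · push_cast
        ring
      · trivial
    | none =>
      by_cases hv : v < last <;> simp [List.find?, hv]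

theorem BRwhile_spec (a : List Int) (last : Int) (g : Nat) (hg : g < a.length)
    (hlt : a[g] < last) (hmax : ∀ m (hm : m < a.length), g < m → ¬ a[m] < last) :
    ∀ (fuel p : Nat), g ≤ p → p < a.length → p + 1 ≤ fuel →
      BRwhile a last ((p : Int) - a.length) fuel = some (g : Int) := by
  intro fuel
  induction fuel with
  | zero => intro p _ _ h; omega
  | succ f ih =>
    intro p hgp hpn hpf
    have hidx : ((p : Int) - (a.length : Int)) = -(((a.length - p : Nat) : Int)) := by omega
    rw [BRwhile, hidx,
      PySem.List.pyGet?_neg_natCast a (a.length - p) (by omega) (by omega)]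
    have hsub : a.length - (a.length - p) = p := by omega
    rw [hsub, List.getElem?_eq_getElem hpn]
    by_cases hpg : p = g
    · subst hpg
      have hval : (a.length : Int) + -(((a.length - p : Nat) : Int)) = (p : Int) := by omega
      simp only [if_neg (not_le.mpr hlt), hval]
    · have hp1 : g < p := lt_of_le_of_ne hgp (Ne.symm hpg)
      have hle : last ≤ a[p] := not_lt.mp (hmax p hpn hp1)
      have hstep : -(((a.length - p : Nat) : Int)) - 1 = ((p - 1 : Nat) : Int) - (a.length : Int) := by omega
      simp only [if_pos hle, hstep]
      exact ih (p-1) (by omega) (by omega) (by omega)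

theorem BRfor_fires (a : List Int) (last : Int) (l : List Int)
    (h : l.any (fun v => decide (v < last)) = true) :
    BRfor a last l = BRwhile a last (-1) a.length := by
  induction l with
  | nil => simp at h
  | cons v t ih =>
    simp only [List.any_cons, Bool.or_eq_true, decide_eq_true_eq] at h
    by_cases hv : v < last
    · simp [BRfor, hv]
    · have hany : t.any (fun v => decide (v < last)) = true := by
        rcases h with h | h
        · exact absurd h hv
        · exact h
      simp [BRfor, hv, ih hany]

theorem BR_eq (a : List Int) (hPre : Pre_BR2 a) (g : Nat) (w : Int)
    (h : lastLt ((a.getLast?).getD 0) a.dropLast = some (g, w)) :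
    BR a = some (g : Int) := by
  obtain ⟨hn, hany⟩ := hPre
  have hne : a ≠ [] := by intro h'; subst h'; simp at hn
  have hlastq : a.getLast? = some (a.getLast hne) := List.getLast?_eq_some_getLast hne
  have hlastD : (a.getLast?).getD 0 = a.getLast hne := by rw [hlastq]; rfl
  have hdl : a.dropLast.length = a.length - 1 := List.length_dropLast
  obtain ⟨hi, hel, hwl, hmx⟩ := lastLt_spec _ _ _ _ h
  have hga : g < a.length := by omega
  have hglast : a[g] = w := by
    rw [← List.getElem_dropLast (by omega)]; exact hel
  have hlast_el : a.getLast hne = a[a.length - 1]'(by omega) := List.getLast_eq_getElem hne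
  simp only [BR, if_neg (show ¬ a.length < 2 by omega), PySem.List.pyGet?_neg_one, hlastq,
    PySem.List.slice_to_neg_one]
  rw [BRfor_fires a _ _ (by rw [← hlastD]; exact hany)]
  have hm1 : (-1 : Int) = ((a.length - 1 : Nat) : Int) - (a.length : Int) := by omega
  rw [hm1]
  apply BRwhile_spec a _ g hga
  · rw [hglast, ← hlastD]; exact hwl
  · intro m hm hgm
    by_cases hml : m < a.length - 1
    · rw [← List.getElem_dropLast (by omega), ← hlastD]
      exact hmx m (by omega) hgm
    · have : m = a.length - 1 := by omega
      subst this
      rw [hlast_el]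
      exact lt_irrefl _
  · omega
  · omega
  · omega

theorem BR2go_eq_find (a : List Int) (g : Int) (h : BR a = some g) (l : List Int) :
    BR2go a l = l.find? (fun i =>
      xFun (PySem.List.slice a (some i) none) (PySem.List.slice a (some g) none)) := by
  induction l with
  | nil => simp [BR2go]
  | cons i rest ih =>
    rw [BR2go, h, List.find?_cons]
    by_cases hx : xFun (PySem.List.slice a (some i) none) (PySem.List.slice a (some g) none)
    · simp [hx]
    · simp only [Bool.not_eq_true] at hx
      simp [hx, ih]

-- ===== VERDICT (by name: the statement is the Claim_ definition above) =====
theorem BR2_spec : Claim_equal_BR2 := by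
  intro a _ hPre
  unfold Spec_BR2
  obtain ⟨hn, hany⟩ := hPre
  have hsome := lastLt_isSome_of_any _ _ hany
  obtain ⟨⟨g, w⟩, hlg⟩ := Option.isSome_iff_exists.mp hsome
  have hBR : BR a = some (g : Int) := BR_eq a ⟨hn, hany⟩ g w hlg
  have hfl := foldl_lastmatch (fun kv : Int × Int => decide (kv.2 < (a.getLast?).getD 0))
    (fun kv : Int × Int => kv.1) (PySem.List.enumerate a.dropLast 0) none
  simp only [decide_eq_true_eq] at hfl
  rw [enum_rev_find] at hfl
  rw [hlg] at hfl
  simp only [Option.map_some] at hfl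
  simp only [zero_add] at hfl
  simp only [BR2, hBR]
  simp only [BR2_alt]
  simp only [if_pos hn, hfl]
  by_cases hg1 : (g : Int) < 1
  · rw [if_pos hg1, if_pos hg1]
  · rw [if_neg hg1, if_neg hg1]
    rw [BR2go_eq_find a (g : Int) hBR]
    have hrange : PySem.List.pyRange ((a.length : Int) - 1) (-1) (-1)
        = ((List.range a.length).map (fun k : Nat => (k : Int))).reverse := by
      rw [PySem.List.pyRange_neg_one_eq_reverse]
      rw [show (-1 : Int) + 1 = 0 from by norm_num,
          show (a.length : Int) - 1 + 1 = (a.length : Int) from by omega]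
      rw [PySem.List.pyRange_zero_natCast]
    rw [hrange, ← List.map_reverse, List.find?_map]
    have hfr := foldl_lastmatch (fun i : Nat => suffixLt a a.length i (Int.toNat ((g : Nat) : Int)))
        (fun i : Nat => (i : Int)) (List.range a.length) none
    rw [hfr]
    obtain ⟨hgd, -, -, -⟩ := lastLt_spec _ _ _ _ hlg
    have hgn : g < a.length := by
      have := List.length_dropLast (xs := a)
      omega
    have hcg : List.find? ((fun i : Int => xFun (PySem.List.slice a (some i) none)
          (PySem.List.slice a (some ((g : Nat) : Int)) none)) ∘ (fun k : Nat => (k : Int)))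
          (List.range a.length).reverse
        = List.find? (fun i : Nat => suffixLt a a.length i (Int.toNat ((g : Nat) : Int)))
          (List.range a.length).reverse := by
      apply find?_congr_mem
      intro x hx
      have hxn : x < a.length := List.mem_range.mp (List.mem_reverse.mp hx)
      simp only [Function.comp, PySem.List.slice_from_natCast, Int.toNat_natCast]
      exact (suffixLt_eq_xFun a (a.length - x) x g (le_refl _) (by omega) (by omega)).symm
    rw [hcg]
    cases List.find? (fun i : Nat => suffixLt a a.length i (Int.toNat ((g : Nat) : Int)))
        (List.range a.length).reverse with
    | none => simp
    | some i => simp
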